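-- pv_equiv track=rewrite | github.com/Chri692u/AOC | AOC2023/3.py | group_vector
-- ===== SOURCE A (Python) =====
-- def group_vector(vector):
--     result = []
--     temp_group = []
--
--     for i in range(len(vector)):
--         if i == 0 or vector[i][1] == vector[i - 1][1] + 1:
--             temp_group.append(vector[i])
--         else:
--             result.append(temp_group)
--             temp_group = [vector[i]]
--
--     if temp_group:
--         result.append(temp_group)
--
--     return result
-- ===== SOURCE B (Python) =====
-- from itertools import groupby
--
-- def group_vector(vector):
--     # A run where each second coordinate is one more than the previous has
--     # constant (index - second coordinate), so groupby on that derived key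
--     # splits at exactly the same break points.
--     return [[e for _, e in g]
--             for _, g in groupby(enumerate(vector), key=lambda ip: ip[0] - ip[1][1])]
-- ===== Notes on version B (the rewrite author's own statement) =====
-- stated objective: idiomatic
-- what changed: Replaces the manual index loop with explicit result/temp_group accumulators by itertools.groupby over enumerate(vector) keyed on index minus second coordinate, which is constant exactly on a consecutive-run, then projects each group back to the elements.
import Mathlib
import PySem

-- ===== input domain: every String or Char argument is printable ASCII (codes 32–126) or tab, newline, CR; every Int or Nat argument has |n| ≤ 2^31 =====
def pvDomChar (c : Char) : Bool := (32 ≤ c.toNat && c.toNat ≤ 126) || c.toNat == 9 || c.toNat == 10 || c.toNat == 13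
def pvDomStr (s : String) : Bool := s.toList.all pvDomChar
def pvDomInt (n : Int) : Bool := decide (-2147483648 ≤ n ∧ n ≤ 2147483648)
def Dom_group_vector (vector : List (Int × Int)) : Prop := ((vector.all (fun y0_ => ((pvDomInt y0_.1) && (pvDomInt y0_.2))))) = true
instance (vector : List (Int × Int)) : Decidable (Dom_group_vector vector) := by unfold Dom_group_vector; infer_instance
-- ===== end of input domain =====

-- B re-implements the grouping with itertools.groupby on enumerate, keyed by (index - second coordinate); idiomatic, same O(n) cost.

-- ===== PORT A =====
-- A's loop over range(len(vector)) with state (result, temp_group).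
def group_vector (vector : List (Int × Int)) : List (List (Int × Int)) :=
  let st := (PySem.List.pyRange 0 (vector.length : Int) 1).foldl
    (fun (st : List (List (Int × Int)) × List (Int × Int)) i =>
      if i = 0 ∨ (PySem.List.pyGetD vector i (0, 0)).2 = (PySem.List.pyGetD vector (i - 1) (0, 0)).2 + 1 then
        (st.1, st.2 ++ [PySem.List.pyGetD vector i (0, 0)])
      else
        (st.1 ++ [st.2], [PySem.List.pyGetD vector i (0, 0)]))
    ([], [])
  if st.2 ≠ [] then st.1 ++ [st.2] else st.1

-- ===== PORT B =====
-- groupby's run collector: take elements of the enumerated pairs while the derived key i - e.2 equals k.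
def pvSpan (k : Int) : List (Int × (Int × Int)) → List (Int × Int) × List (Int × (Int × Int))
  | [] => ([], [])
  | (i, e) :: rest =>
    if i - e.2 = k then
      let s := pvSpan k rest
      (e :: s.1, s.2)
    else ([], (i, e) :: rest)

lemma pvSpan_length_le (k : Int) : ∀ l : List (Int × (Int × Int)), (pvSpan k l).2.length ≤ l.length
  | [] => by simp [pvSpan]
  | (i, e) :: rest => by
    unfold pvSpan
    split
    · exact Nat.le_succ_of_le (pvSpan_length_le k rest)
    · exact Nat.le_refl _

-- itertools.groupby over the enumerated list, projecting each group back to the elements.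
def pvGroupby : List (Int × (Int × Int)) → List (List (Int × Int))
  | [] => []
  | (i, e) :: rest =>
    let s := pvSpan (i - e.2) rest
    (e :: s.1) :: pvGroupby s.2
termination_by l => l.length
decreasing_by exact Nat.lt_succ_of_le (pvSpan_length_le _ rest)

def group_vector_alt (vector : List (Int × Int)) : List (List (Int × Int)) :=
  pvGroupby (PySem.List.enumerate vector 0)

-- ===== PRECONDITION & SPEC =====
def Spec_group_vector (vector : List (Int × Int)) (out : List (List (Int × Int))) : Prop := out = group_vector_alt vector
instance (vector : List (Int × Int)) (out : List (List (Int × Int))) : Decidable (Spec_group_vector vector out) := by unfold Spec_group_vector; infer_instance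

-- ===== CLAIM (what is proved, stated in full; the proofs are below) =====
def Claim_equal_group_vector : Prop := ∀ (vector : List (Int × Int)), Dom_group_vector vector → Spec_group_vector vector (group_vector vector)

-- ===== LEMMAS AND PROOFS =====

-- Reference recursion: collect a run by comparing with the previous element.
def span2 (p : Int × Int) : List (Int × Int) → List (Int × Int) × List (Int × Int)
  | [] => ([], [])
  | y :: ys =>
    if y.2 = p.2 + 1 then
      let s := span2 y ys
      (y :: s.1, s.2)
    else ([], y :: ys)

lemma span2_length_le (p : Int × Int) : ∀ l : List (Int × Int), (span2 p l).2.length ≤ l.length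
  | [] => by simp [span2]
  | y :: ys => by
    unfold span2
    split
    · exact Nat.le_succ_of_le (span2_length_le y ys)
    · exact Nat.le_refl _

def gb2 : List (Int × Int) → List (List (Int × Int))
  | [] => []
  | x :: xs =>
    let s := span2 x xs
    (x :: s.1) :: gb2 s.2
termination_by l => l.length
decreasing_by exact Nat.lt_succ_of_le (span2_length_le _ xs)

-- B side: pvSpan on an enumerated tail is span2 on the plain tail.
lemma pvSpan_enumerate : ∀ (xs : List (Int × Int)) (i : Int) (p : Int × Int),
    pvSpan (i - p.2) (PySem.List.enumerate xs (i + 1)) =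
      ((span2 p xs).1,
       PySem.List.enumerate (span2 p xs).2 (i + 1 + ((span2 p xs).1.length : Int)))
  | [], i, p => by simp [pvSpan, span2, PySem.List.enumerate_nil]
  | y :: ys, i, p => by
    rw [PySem.List.enumerate_cons]
    unfold pvSpan span2
    by_cases h : y.2 = p.2 + 1
    · have hk : i + 1 - y.2 = i - p.2 := by omega
      rw [if_pos hk, if_pos h]
      have hrec := pvSpan_enumerate ys (i + 1) y
      rw [hk] at hrec
      simp only [hrec]
      rw [Prod.mk.injEq]
      refine ⟨rfl, ?_⟩
      congr 1
      push_cast [List.length_cons]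
      ring
    · have hk : ¬ (i + 1 - y.2 = i - p.2) := by omega
      rw [if_neg hk, if_neg h]
      simp [PySem.List.enumerate_cons]

-- B side: pvGroupby on the enumerated list is gb2.
lemma pvGroupby_enumerate : ∀ (n : Nat) (xs : List (Int × Int)), xs.length ≤ n → ∀ i : Int,
    pvGroupby (PySem.List.enumerate xs i) = gb2 xs
  | 0, [], _, i => by simp [PySem.List.enumerate_nil, pvGroupby, gb2]
  | Nat.succ n, [], _, i => by simp [PySem.List.enumerate_nil, pvGroupby, gb2]
  | Nat.succ n, x :: xs, h, i => by
    rw [PySem.List.enumerate_cons]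
    unfold pvGroupby gb2
    simp only [pvSpan_enumerate xs i x]
    have hlen : (span2 x xs).2.length ≤ n := le_trans (span2_length_le x xs) (Nat.le_of_succ_le_succ h)
    rw [pvGroupby_enumerate n (span2 x xs).2 hlen]

-- A side: the run-collecting loop with previous element, result list and current group.
def loopA (prev : Int × Int) (res : List (List (Int × Int))) (temp : List (Int × Int)) :
    List (Int × Int) → List (List (Int × Int)) × List (Int × Int)
  | [] => (res, temp)
  | y :: ys =>
    if y.2 = prev.2 + 1 then loopA y res (temp ++ [y]) ys
    else loopA y (res ++ [temp]) [y] ys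

-- A's index fold over the tail of the range equals loopA on the suffix.
lemma foldA_loopA : ∀ (suf pre : List (Int × Int)) (hp : pre ≠ [])
    (res : List (List (Int × Int))) (temp : List (Int × Int)),
    (PySem.List.pyRange (pre.length : Int) (((pre ++ suf).length : Int)) 1).foldl
      (fun (st : List (List (Int × Int)) × List (Int × Int)) i =>
        if i = 0 ∨ (PySem.List.pyGetD (pre ++ suf) i (0, 0)).2 =
            (PySem.List.pyGetD (pre ++ suf) (i - 1) (0, 0)).2 + 1 then
          (st.1, st.2 ++ [PySem.List.pyGetD (pre ++ suf) i (0, 0)])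
        else
          (st.1 ++ [st.2], [PySem.List.pyGetD (pre ++ suf) i (0, 0)]))
      (res, temp) = loopA (pre.getLast hp) res temp suf
  | [], pre, hp, res, temp => by
    rw [PySem.List.pyRange_one_eq_nil (by simp)]
    simp [loopA]
  | y :: ys, pre, hp, res, temp => by
    have hlt : (pre.length : Int) < ((pre ++ y :: ys).length : Int) := by
      simp
    rw [PySem.List.pyRange_one_cons hlt, List.foldl_cons]
    have hget : PySem.List.pyGetD (pre ++ y :: ys) (pre.length : Int) (0, 0) = y := by
      rw [PySem.List.pyGetD_eq_getElem _ _ (by omega) hlt]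
      simp
    have hpos : 0 < pre.length := List.length_pos_iff.mpr hp
    have hprev : PySem.List.pyGetD (pre ++ y :: ys) ((pre.length : Int) - 1) (0, 0) = pre.getLast hp := by
      rw [PySem.List.pyGetD_eq_getElem _ _ (by omega) (by omega)]
      have ht : ((pre.length : Int) - 1).toNat = pre.length - 1 := by omega
      simp only [ht]
      rw [List.getElem_append_left (by omega), List.getLast_eq_getElem]
    have harr : pre ++ y :: ys = (pre ++ [y]) ++ ys := by simp
    have hlen1 : ((pre ++ [y]).length : Int) = (pre.length : Int) + 1 := by simp
    have hlast : (pre ++ [y]).getLast (by simp) = y := by simp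
    by_cases h : y.2 = (pre.getLast hp).2 + 1
    · rw [if_pos (Or.inr (by rw [hget, hprev]; exact h))]
      rw [hget]
      have hrec := foldA_loopA ys (pre ++ [y]) (by simp) res (temp ++ [y])
      rw [hlast] at hrec
      rw [hlen1, ← harr] at hrec
      rw [hrec]
      simp [loopA, h]
    · rw [if_neg (by
        rintro (h0 | hc)
        · omega
        · rw [hget, hprev] at hc; exact h hc)]
      rw [hget]
      have hrec := foldA_loopA ys (pre ++ [y]) (by simp) (res ++ [temp]) [y]
      rw [hlast] at hrec
      rw [hlen1, ← harr] at hrec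
      rw [hrec]
      simp [loopA, h]

-- Finishing step ('if temp_group: result.append(temp_group)') applied to loopA equals the reference grouping.
def finishA (st : List (List (Int × Int)) × List (Int × Int)) : List (List (Int × Int)) :=
  if st.2 ≠ [] then st.1 ++ [st.2] else st.1

lemma loopA_gb2 : ∀ (suf : List (Int × Int)) (prev : Int × Int)
    (res : List (List (Int × Int))) (temp : List (Int × Int)), temp ≠ [] →
    finishA (loopA prev res temp suf) =
      res ++ (temp ++ (span2 prev suf).1) :: gb2 (span2 prev suf).2
  | [], prev, res, temp, h => by simp [loopA, finishA, span2, gb2, h]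
  | y :: ys, prev, res, temp, h => by
    unfold loopA span2
    by_cases hc : y.2 = prev.2 + 1
    · rw [if_pos hc, if_pos hc]
      rw [loopA_gb2 ys y res (temp ++ [y]) (by simp)]
      simp
    · rw [if_neg hc, if_neg hc]
      rw [loopA_gb2 ys y (res ++ [temp]) [y] (by simp)]
      rw [gb2]
      simp

lemma group_vector_eq_gb2 (v : List (Int × Int)) : group_vector v = gb2 v := by
  cases v with
  | nil =>
    simp [group_vector, gb2, PySem.List.pyRange_one_eq_nil]
  | cons x xs =>
    unfold group_vector
    have hpos : (0 : Int) < ((x :: xs).length : Int) := by simp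
    rw [PySem.List.pyRange_one_cons hpos, List.foldl_cons]
    rw [if_pos (Or.inl rfl)]
    have hx : PySem.List.pyGetD (x :: xs) (0 : Int) (0, 0) = x := by
      simp [PySem.List.pyGetD_zero_cons]
    rw [hx]
    have harr : (x :: xs : List (Int × Int)) = [x] ++ xs := by simp
    have hrec := foldA_loopA xs [x] (by simp) [] [x]
    rw [← harr] at hrec
    have h1 : (([x] : List (Int × Int)).length : Int) = ((0 : Int) + 1) := by simp
    rw [h1] at hrec
    show finishA _ = _
    rw [show ((([] : List (List (Int × Int))), ([] : List (Int × Int))).1,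
          ([] : List (Int × Int)) ++ [x]) = (([] : List (List (Int × Int))), [x]) by simp]
    rw [hrec]
    rw [loopA_gb2 xs ([x].getLast (by simp)) [] [x] (by simp)]
    have hlast : ([x] : List (Int × Int)).getLast (by simp) = x := by simp
    rw [hlast]
    rw [gb2]
    simp

-- ===== VERDICT (by name: the statement is the Claim_ definition above) =====
theorem group_vector_spec : Claim_equal_group_vector := by
  intro v _
  show group_vector v = group_vector_alt v
  rw [group_vector_eq_gb2, group_vector_alt,
    pvGroupby_enumerate v.length v (Nat.le_refl _) 0]
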